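-- pv_equiv track=rewrite | github.com/BorcaWill/competitive_programming | .venv/UQCS_CodeJam_2025/Finding Anagrams in a list.py | solution
-- ===== SOURCE A (Python) =====
-- def solution(counts, words):
--     # Write your code here
--     anagram_list = []
--     words_sets_list = []
--     words_list = []
--     count = 0
--     for word in words:
--         word = word.lower()
--         candidate = set(word)
--         if word not in words_list:# is a different word
--             words_list.append(word)#register a different word
--             if candidate not in words_sets_list:#is a new set of alphas
--                 words_sets_list.append(candidate)#register a new set of alphas
--             else:#is an anagram set
--                 anagram_list.append(candidate)
--     words_list = []
--     for word in words:
--         word = word.lower()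
--         candidate = set(word)
--         if word not in words_list:# is a different word
--             if candidate in anagram_list:#is an anagram
--                 count += 1
--     return count
-- ===== SOURCE B (Python) =====
-- def solution(counts, words):
--     occ = {}          # lowercased word -> number of occurrences in words
--     freq = {}         # canonical char-set key -> number of DISTINCT lowercased words with that key
--     for word in words:
--         w = word.lower()
--         if w in occ:
--             occ[w] += 1
--         else:
--             occ[w] = 1
--             key = ''.join(sorted(set(w)))
--             freq[key] = freq.get(key, 0) + 1
--     return sum(n for w, n in occ.items() if freq[''.join(sorted(set(w)))] >= 2)
-- ===== Notes on version B (the rewrite author's own statement) =====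
-- stated objective: faster
-- what changed: B makes one pass building a per-word occurrence dict and a per-char-set group-frequency dict keyed by a canonical sorted-char string, then sums occurrence counts over the dict whose group frequency is >= 2, instead of A's two passes over words with linear membership scans of three lists.
import Mathlib
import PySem

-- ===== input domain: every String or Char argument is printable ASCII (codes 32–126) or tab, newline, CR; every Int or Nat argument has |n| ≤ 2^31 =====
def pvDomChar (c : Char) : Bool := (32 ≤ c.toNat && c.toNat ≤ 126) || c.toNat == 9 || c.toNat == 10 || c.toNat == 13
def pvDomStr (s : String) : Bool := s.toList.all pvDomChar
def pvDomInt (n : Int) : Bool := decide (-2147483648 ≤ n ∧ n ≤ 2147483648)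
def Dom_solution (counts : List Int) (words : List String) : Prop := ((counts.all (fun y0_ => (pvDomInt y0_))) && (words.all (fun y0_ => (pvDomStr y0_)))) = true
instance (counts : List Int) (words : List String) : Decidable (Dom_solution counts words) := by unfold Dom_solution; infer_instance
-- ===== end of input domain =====

-- B replaces A's two word passes with linear list scans by one dict-building pass plus an aggregation over the dict (objective: faster; measured).
-- ===== PORT A =====
-- Python `candidate in <list of sets>` compares elements with ==, which on sets is extensional:
-- ported as List.any (PySem.Set.equal · candidate) — exact.
def solution (counts : List Int) (words : List String) : Int :=
  let st := words.foldl
    (fun (st : List (PySem.Set Char) × List (PySem.Set Char) × List String) word =>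
      let w := PySem.Str.lower word
      let candidate : PySem.Set Char := PySem.Set.ofList w.toList
      let anagramList := st.1
      let wordsSetsList := st.2.1
      let wordsList := st.2.2
      if wordsList.contains w then st
      else if wordsSetsList.any (fun s => PySem.Set.equal s candidate) = false then
        (anagramList, wordsSetsList ++ [candidate], wordsList ++ [w])
      else
        (anagramList ++ [candidate], wordsSetsList, wordsList ++ [w]))
    ([], [], [])
  let anagramList := st.1
  -- second loop: words_list = [] and is never appended to in this loop (the Python never adds to it)
  let wordsList2 : List String := []
  words.foldl
    (fun count word =>
      let w := PySem.Str.lower word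
      let candidate : PySem.Set Char := PySem.Set.ofList w.toList
      if wordsList2.contains w = false then
        if anagramList.any (fun s => PySem.Set.equal s candidate) then count + 1 else count
      else count)
    0

-- ===== PORT B =====
-- ''.join(sorted(set(w))): a String from the sorted distinct chars — exact (sorted over a set
-- with the identity key is order-independent; ''.join of single chars is String.mk).
def bKey (w : String) : String :=
  String.ofList (PySem.List.sorted (PySem.Set.ofList w.toList) (fun c => c) false)

def solution_alt (counts : List Int) (words : List String) : Int :=
  let st := words.foldl
    (fun (st : PySem.Dict String Int × PySem.Dict String Int) word =>
      let w := PySem.Str.lower word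
      let occ := st.1
      let freq := st.2
      if occ.contains w then (occ.insert w (occ.getD w 0 + 1), freq)
      else
        let key := bKey w
        (occ.insert w 1, freq.insert key (freq.getD key 0 + 1)))
    (PySem.Dict.empty, PySem.Dict.empty)
  let occ := st.1
  let freq := st.2
  -- freq[bKey w]: the key is present for every w in occ, so getD _ 0 is the exact lookup here
  occ.items.foldl
    (fun acc p => if 2 ≤ freq.getD (bKey p.1) 0 then acc + p.2 else acc)
    0


-- ===== PRECONDITION & SPEC =====
def Spec_solution (counts : List Int) (words : List String) (out : Int) : Prop := out = solution_alt counts words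
instance (counts : List Int) (words : List String) (out : Int) : Decidable (Spec_solution counts words out) := by unfold Spec_solution; infer_instance

-- ===== CLAIM (what is proved, stated in full; the proofs are below) =====
def Claim_equal_solution : Prop := ∀ (counts : List Int) (words : List String), Dom_solution counts words → Spec_solution counts words (solution counts words)


-- ===== LEMMAS AND PROOFS =====

-- abbreviations for the proofs
def pvLow (w : String) : String := PySem.Str.lower w

def pvSet (w : String) : PySem.Set Char := PySem.Set.ofList w.toList

def pvEqv (v w : String) : Bool := PySem.Set.equal (pvSet v) (pvSet w)

-- A's loop-1 step and run, over already-lowered words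
def stepA (st : List (PySem.Set Char) × List (PySem.Set Char) × List String) (w : String) :
    List (PySem.Set Char) × List (PySem.Set Char) × List String :=
  let candidate := pvSet w
  if st.2.2.contains w then st
  else if st.2.1.any (fun s => PySem.Set.equal s candidate) = false then
    (st.1, st.2.1 ++ [candidate], st.2.2 ++ [w])
  else (st.1 ++ [candidate], st.2.1, st.2.2 ++ [w])

def runA (xs : List String) : List (PySem.Set Char) × List (PySem.Set Char) × List String :=
  xs.foldl stepA ([], [], [])

-- B's step and run, over already-lowered words
def stepB (st : PySem.Dict String Int × PySem.Dict String Int) (w : String) :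
    PySem.Dict String Int × PySem.Dict String Int :=
  if st.1.contains w then (st.1.insert w (st.1.getD w 0 + 1), st.2)
  else (st.1.insert w 1, st.2.insert (bKey w) (st.2.getD (bKey w) 0 + 1))

def runB (xs : List String) : PySem.Dict String Int × PySem.Dict String Int :=
  xs.foldl stepB (PySem.Dict.empty, PySem.Dict.empty)

theorem pvEqv_iff (v w : String) : pvEqv v w = true ↔ ∀ c, c ∈ v.toList ↔ c ∈ w.toList := by
  simp [pvEqv, pvSet, PySem.Set.equal_iff, PySem.Set.mem_ofList]

theorem bKey_eq_iff (v w : String) : bKey v = bKey w ↔ pvEqv v w = true := by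
  constructor
  · intro h
    rw [pvEqv_iff]
    have h' := congrArg String.toList h
    simp only [bKey, String.toList_ofList] at h'
    intro c
    constructor
    · intro hc
      have : c ∈ PySem.List.sorted (PySem.Set.ofList v.toList) (fun c => c) false := by
        rw [PySem.List.mem_sorted, PySem.Set.mem_ofList]; exact hc
      rw [h'] at this
      rw [PySem.List.mem_sorted, PySem.Set.mem_ofList] at this; exact this
    · intro hc
      have : c ∈ PySem.List.sorted (PySem.Set.ofList w.toList) (fun c => c) false := by
        rw [PySem.List.mem_sorted, PySem.Set.mem_ofList]; exact hc
      rw [← h'] at this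
      rw [PySem.List.mem_sorted, PySem.Set.mem_ofList] at this; exact this
  · intro h
    rw [pvEqv_iff] at h
    have hperm : (PySem.List.sorted (PySem.Set.ofList w.toList) (fun c => c) false).Perm
        (PySem.Set.ofList v.toList) := by
      apply List.Perm.trans (PySem.List.sorted_perm _ _ _)
      rw [List.perm_ext_iff_of_nodup (PySem.Set.nodup_ofList _) (PySem.Set.nodup_ofList _)]
      intro c
      rw [PySem.Set.mem_ofList, PySem.Set.mem_ofList]
      exact (h c).symm
    have := PySem.List.sorted_eq_of_perm_of_pairwise_lt (PySem.Set.ofList v.toList)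
      (PySem.List.sorted (PySem.Set.ofList w.toList) (fun c => c)) (fun c : Char => c)
      hperm (PySem.List.sorted_ofList_pairwise_lt _)
    simp only [bKey, this]

theorem dedup_append_singleton (xs : List String) (w : String) :
    PySem.List.dedup (xs ++ [w]) =
      if w ∈ xs then PySem.List.dedup xs else PySem.List.dedup xs ++ [w] := by
  simp only [PySem.List.dedup_eq_ofList, PySem.Set.ofList_eq_foldl, List.foldl_append,
    List.foldl_cons, List.foldl_nil]
  rw [← PySem.Set.ofList_eq_foldl]
  by_cases h : w ∈ xs
  · simp [h, PySem.Set.add, PySem.Set.contains, PySem.Set.mem_ofList]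
  · simp [h, PySem.Set.add, PySem.Set.contains, PySem.Set.mem_ofList]

theorem equal_symm {s t : PySem.Set Char} (h : PySem.Set.equal s t = true) :
    PySem.Set.equal t s = true := by
  rw [PySem.Set.equal_iff] at h ⊢
  exact fun c => (h c).symm

theorem equal_trans {s t u : PySem.Set Char} (h1 : PySem.Set.equal s t = true)
    (h2 : PySem.Set.equal t u = true) : PySem.Set.equal s u = true := by
  rw [PySem.Set.equal_iff] at h1 h2 ⊢
  exact fun c => (h1 c).trans (h2 c)

theorem invA (xs : List String) :
    (runA xs).2.2 = PySem.List.dedup xs ∧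
    (∀ c, ((runA xs).2.1.any (fun s => PySem.Set.equal s c) = true) ↔
        ∃ v ∈ PySem.List.dedup xs, PySem.Set.equal (pvSet v) c = true) ∧
    (∀ c, ((runA xs).1.any (fun s => PySem.Set.equal s c) = true) ↔
        2 ≤ (PySem.List.dedup xs).countP (fun v => PySem.Set.equal (pvSet v) c)) := by
  induction xs using List.reverseRecOn with
  | nil =>
    refine ⟨rfl, fun c => ?_, fun c => ?_⟩ <;> simp [runA]
  | append_singleton xs w ih =>
    obtain ⟨h1, h2, h3⟩ := ih
    have hrun : runA (xs ++ [w]) = stepA (runA xs) w := by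
      simp [runA, List.foldl_append]
    by_cases hw : w ∈ xs
    · have hc : (runA xs).2.2.contains w = true := by
        rw [h1]
        simp [PySem.Set.mem_ofList, hw]
      have hstep : stepA (runA xs) w = runA xs := by
        simp only [stepA, hc]
        simp
      have hd : PySem.List.dedup (xs ++ [w]) = PySem.List.dedup xs := by
        rw [dedup_append_singleton]; simp [hw]
      rw [hrun, hstep, hd]
      exact ⟨h1, h2, h3⟩
    · have hc : (runA xs).2.2.contains w = false := by
        rw [h1]
        simp [PySem.Set.mem_ofList, hw]
      have hd : PySem.List.dedup (xs ++ [w]) = PySem.List.dedup xs ++ [w] := by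
        rw [dedup_append_singleton]; simp [hw]
      by_cases hex : (runA xs).2.1.any (fun s => PySem.Set.equal s (pvSet w)) = true
      · -- w's char-set already seen among distinct words: append to anagram_list
        have hstep : stepA (runA xs) w =
            ((runA xs).1 ++ [pvSet w], (runA xs).2.1, (runA xs).2.2 ++ [w]) := by
          simp only [stepA, hc, hex]
          simp
        obtain ⟨v0, hv0mem, hv0eq⟩ := (h2 (pvSet w)).mp hex
        rw [hrun, hstep, hd]
        refine ⟨by rw [h1], fun c => ?_, fun c => ?_⟩
        · constructor
          · intro h
            obtain ⟨v, hv, he⟩ := (h2 c).mp h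
            exact ⟨v, List.mem_append.mpr (Or.inl hv), he⟩
          · rintro ⟨v, hv, he⟩
            rcases List.mem_append.mp hv with hv | hv
            · exact (h2 c).mpr ⟨v, hv, he⟩
            · simp at hv
              subst hv
              exact (h2 c).mpr ⟨v0, hv0mem, equal_trans hv0eq he⟩
        · rw [List.countP_append]
          simp only [List.any_append, List.any_cons, List.any_nil, Bool.or_false,
            Bool.or_eq_true, List.countP_cons, List.countP_nil]
          by_cases hwc : PySem.Set.equal (pvSet w) c = true
          · have hpos : 0 < (PySem.List.dedup xs).countP (fun v => PySem.Set.equal (pvSet v) c) := by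
              rw [List.countP_pos_iff]
              exact ⟨v0, hv0mem, equal_trans hv0eq hwc⟩
            rw [if_pos hwc]
            constructor
            · intro _; omega
            · intro _; right; exact hwc
          · rw [if_neg hwc]
            constructor
            · rintro (h | h)
              · have := (h3 c).mp h; omega
              · exact absurd h hwc
            · intro h
              left
              exact (h3 c).mpr (by omega)
      · -- a new char-set: append to words_sets_list
        have hex' : (runA xs).2.1.any (fun s => PySem.Set.equal s (pvSet w)) = false := by
          simp [hex]
        have hstep : stepA (runA xs) w =
            ((runA xs).1, (runA xs).2.1 ++ [pvSet w], (runA xs).2.2 ++ [w]) := by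
          simp only [stepA, hc, hex']
          simp
        have hnone : ∀ v ∈ PySem.List.dedup xs, PySem.Set.equal (pvSet v) (pvSet w) = false := by
          intro v hv
          by_contra hne
          exact hex ((h2 (pvSet w)).mpr ⟨v, hv, by simpa using hne⟩)
        rw [hrun, hstep, hd]
        refine ⟨by rw [h1], fun c => ?_, fun c => ?_⟩
        · simp only [List.any_append, List.any_cons, List.any_nil, Bool.or_false,
            Bool.or_eq_true]
          constructor
          · rintro (h | h)
            · obtain ⟨v, hv, he⟩ := (h2 c).mp h
              exact ⟨v, List.mem_append.mpr (Or.inl hv), he⟩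
            · exact ⟨w, List.mem_append.mpr (Or.inr (by simp)), h⟩
          · rintro ⟨v, hv, he⟩
            rcases List.mem_append.mp hv with hv | hv
            · exact Or.inl ((h2 c).mpr ⟨v, hv, he⟩)
            · simp at hv
              subst hv
              exact Or.inr he
        · rw [List.countP_append]
          simp only [List.countP_cons, List.countP_nil]
          by_cases hwc : PySem.Set.equal (pvSet w) c = true
          · have hzero : (PySem.List.dedup xs).countP (fun v => PySem.Set.equal (pvSet v) c) = 0 := by
              rw [List.countP_eq_zero]
              intro v hv hvc
              have : PySem.Set.equal (pvSet v) (pvSet w) = true :=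
                equal_trans hvc (equal_symm hwc)
              rw [hnone v hv] at this
              exact Bool.false_ne_true this
            rw [if_pos hwc, hzero]
            constructor
            · intro h
              have := (h3 c).mp h
              omega
            · intro h; omega
          · rw [if_neg hwc]
            constructor
            · intro h; have := (h3 c).mp h; omega
            · intro h; exact (h3 c).mpr (by omega)

theorem invB (xs : List String) :
    (runB xs).1.items = (PySem.List.dedup xs).map (fun v => (v, (xs.count v : Int))) ∧
    (∀ k, (runB xs).2.getD k 0 = ((PySem.List.dedup xs).countP (fun v => bKey v == k) : Int)) := by
  induction xs using List.reverseRecOn with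
  | nil =>
    refine ⟨by rfl, fun k => ?_⟩
    simp [runB]
  | append_singleton xs w ih =>
    obtain ⟨h1, h2⟩ := ih
    have hrun : runB (xs ++ [w]) = stepB (runB xs) w := by
      simp [runB, List.foldl_append]
    have hkeys : (runB xs).1.keys = PySem.List.dedup xs := by
      simp only [PySem.Dict.keys, h1, List.map_map]
      exact List.map_id _
    have hnd : (runB xs).1.keys.Nodup := by
      rw [hkeys]
      simp
    by_cases hw : w ∈ xs
    · have hcont : (runB xs).1.contains w = true := by
        rw [PySem.Dict.contains_iff_mem_keys, hkeys]
        simpa using hw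
      have hgetD : (runB xs).1.getD w 0 = (xs.count w : Int) := by
        apply PySem.Dict.getD_of_mem_items _ ?_ hnd
        rw [h1]
        exact List.mem_map_of_mem (by simpa using hw)
      have hstep : stepB (runB xs) w =
          ((runB xs).1.insert w ((runB xs).1.getD w 0 + 1), (runB xs).2) := by
        simp only [stepB, hcont]
        simp
      have hd : PySem.List.dedup (xs ++ [w]) = PySem.List.dedup xs := by
        rw [dedup_append_singleton]; simp [hw]
      rw [hrun, hstep, hd]
      refine ⟨?_, fun k => h2 k⟩
      rw [PySem.Dict.items_insert_of_contains _ _ hcont, h1, List.map_map]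
      apply List.map_congr_left
      intro v hv
      simp only [Function.comp_apply]
      by_cases hvw : v = w
      · subst hvw
        simp [List.count_append, hgetD]
      · have hb : (v == w) = false := by simp [hvw]
        simp only [hb, Bool.false_eq_true, if_false]
        rw [List.count_append]
        have hz : List.count v [w] = 0 := List.count_eq_zero.mpr (by simp [hvw])
        simp [hz]
    · have hcont : (runB xs).1.contains w = false := by
        rw [← Bool.not_eq_true, PySem.Dict.contains_iff_mem_keys, hkeys]
        simpa using hw
      have hstep : stepB (runB xs) w =
          ((runB xs).1.insert w 1,
            (runB xs).2.insert (bKey w) ((runB xs).2.getD (bKey w) 0 + 1)) := by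
        simp only [stepB, hcont]
        simp
      have hd : PySem.List.dedup (xs ++ [w]) = PySem.List.dedup xs ++ [w] := by
        rw [dedup_append_singleton]; simp [hw]
      rw [hrun, hstep, hd]
      constructor
      · rw [PySem.Dict.items_insert_of_not_contains _ _ hcont, h1, List.map_append]
        congr 1
        · apply List.map_congr_left
          intro v hv
          have hvx : v ∈ xs := by simpa using (PySem.List.mem_dedup _ _).mp hv
          have hvw : v ≠ w := fun h => hw (h ▸ hvx)
          rw [List.count_append]
          have hz : List.count v [w] = 0 := List.count_eq_zero.mpr (by simp [hvw])
          simp [hz]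
        · have : xs.count w = 0 := List.count_eq_zero.mpr (by simpa using hw)
          simp [List.count_append, this]
      · intro k
        rw [List.countP_append]
        simp only [List.countP_cons, List.countP_nil]
        rw [PySem.Dict.getD_insert]
        by_cases hk : k = bKey w
        · subst hk
          rw [if_pos rfl, h2]
          simp
        · rw [if_neg hk, h2]
          have : (bKey w == k) = false := by
            simpa using Ne.symm hk
          simp [this]

theorem sum_map_single (l : List String) (w : String) (c : Int) (hnd : l.Nodup) (hw : w ∈ l) :
    (l.map (fun v => if v = w then c else 0)).sum = c := by
  induction l with
  | nil => cases hw
  | cons a t ih =>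
    rcases List.mem_cons.mp hw with h | h
    · subst h
      have hna : w ∉ t := (List.nodup_cons.mp hnd).1
      have hz : (t.map (fun v => if v = w then c else 0)).sum = 0 := by
        apply List.sum_eq_zero
        intro x hx
        obtain ⟨v, hv, rfl⟩ := List.mem_map.mp hx
        rw [if_neg (fun h : v = w => hna (by rw [← h]; exact hv))]
      simp [hz]
    · have hne : a ≠ w := by
        rintro rfl
        exact (List.nodup_cons.mp hnd).1 h
      simp only [List.map_cons, List.sum_cons, if_neg hne]
      rw [ih (List.nodup_cons.mp hnd).2 h, zero_add]

theorem countP_eq_sum_dedup (xs : List String) (P : String → Bool) :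
    ((xs.countP P : Nat) : Int) =
      ((PySem.List.dedup xs).map (fun v => if P v then (xs.count v : Int) else 0)).sum := by
  induction xs using List.reverseRecOn with
  | nil => simp
  | append_singleton xs w ih =>
    rw [List.countP_append, dedup_append_singleton]
    by_cases hw : w ∈ xs
    · rw [if_pos hw]
      have hsplit :
          ((PySem.List.dedup xs).map (fun v => if P v then (((xs ++ [w]).count v : Nat) : Int) else 0)).sum =
            ((PySem.List.dedup xs).map (fun v => if P v then (xs.count v : Int) else 0)).sum +
            ((PySem.List.dedup xs).map (fun v => if v = w then (if P w then (1 : Int) else 0) else 0)).sum := by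
        rw [← List.sum_map_add]
        apply congrArg
        apply List.map_congr_left
        intro v hv
        rw [List.count_append]
        by_cases hvw : v = w
        · subst hvw
          have h1 : List.count v [v] = 1 := by simp
          by_cases hp : P v = true <;> simp [hp, h1]
        · have hz : List.count v [w] = 0 := List.count_eq_zero.mpr (by simp [hvw])
          rw [hz, if_neg hvw, add_zero]
          simp
      rw [hsplit, sum_map_single _ _ _ (by simp) (by simpa using hw), ← ih]
      rcases Bool.eq_false_or_eq_true (P w) with hp | hp <;> simp [hp]
    · rw [if_neg hw, List.map_append, List.sum_append]
      have hone : (xs ++ [w]).count w = 1 := by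
        rw [List.count_append, List.count_eq_zero.mpr (by simpa using hw)]
        simp
      have hcongr :
          ((PySem.List.dedup xs).map (fun v => if P v then (((xs ++ [w]).count v : Nat) : Int) else 0)).sum =
            ((PySem.List.dedup xs).map (fun v => if P v then (xs.count v : Int) else 0)).sum := by
        apply congrArg
        apply List.map_congr_left
        intro v hv
        have hvx : v ∈ xs := by simpa using (PySem.List.mem_dedup _ _).mp hv
        have hvw : v ≠ w := fun h => hw (h ▸ hvx)
        have hz : List.count v [w] = 0 := List.count_eq_zero.mpr (by simp [hvw])
        rw [List.count_append, hz]
        simp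
      rw [hcongr, ← ih]
      have hzx : xs.count w = 0 := List.count_eq_zero.mpr (by simpa using hw)
      rcases Bool.eq_false_or_eq_true (P w) with hp | hp <;> simp [hp, hone, hzx]

theorem solution_eq_countP (counts : List Int) (words : List String) :
    solution counts words =
      (((words.map pvLow).countP
        (fun w => (runA (words.map pvLow)).1.any (fun s => PySem.Set.equal s (pvSet w))) : Nat) : Int) := by
  have hfold1 : ∀ (ws : List String) init,
      ws.foldl (fun (st : List (PySem.Set Char) × List (PySem.Set Char) × List String) word =>
        let w := PySem.Str.lower word
        let candidate : PySem.Set Char := PySem.Set.ofList w.toList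
        let anagramList := st.1
        let wordsSetsList := st.2.1
        let wordsList := st.2.2
        if wordsList.contains w then st
        else if wordsSetsList.any (fun s => PySem.Set.equal s candidate) = false then
          (anagramList, wordsSetsList ++ [candidate], wordsList ++ [w])
        else
          (anagramList ++ [candidate], wordsSetsList, wordsList ++ [w])) init =
      (ws.map pvLow).foldl stepA init := by
    intro ws
    induction ws with
    | nil => intro init; rfl
    | cons x t ih =>
      intro init
      simp only [List.foldl_cons, List.map_cons]
      rw [ih]
      rfl
  have hfold2 : ∀ (ana : List (PySem.Set Char)) (ws : List String) (a : Int),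
      ws.foldl (fun count word =>
        let w := PySem.Str.lower word
        let candidate : PySem.Set Char := PySem.Set.ofList w.toList
        if (([] : List String)).contains w = false then
          (if ana.any (fun s => PySem.Set.equal s candidate) then count + 1 else count)
        else count) a =
      a + (((ws.map pvLow).countP (fun w => ana.any (fun s => PySem.Set.equal s (pvSet w))) : Nat) : Int) := by
    intro ana ws
    induction ws with
    | nil => intro a; simp
    | cons x t ih =>
      intro a
      simp only [List.foldl_cons, List.map_cons, List.countP_cons]
      rw [ih]
      have hguard : (([] : List String).contains (PySem.Str.lower x) = false) := rfl
      rw [if_pos hguard]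
      rcases Bool.eq_false_or_eq_true (ana.any (fun s => PySem.Set.equal s (pvSet (pvLow x)))) with h | h
      · have h1 : (ana.any fun s => PySem.Set.equal s (PySem.Set.ofList (PySem.Str.lower x).toList)) = true := h
        rw [if_pos h1, if_pos h]
        push_cast
        ring
      · have h1 : (ana.any fun s => PySem.Set.equal s (PySem.Set.ofList (PySem.Str.lower x).toList)) = false := h
        rw [if_neg (by intro hc; rw [h1] at hc; exact Bool.false_ne_true hc),
          if_neg (by intro hc; rw [h] at hc; exact Bool.false_ne_true hc)]
        push_cast
        ring
  unfold solution
  rw [hfold1, hfold2]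
  simp [runA]

theorem solution_alt_eq_sum (counts : List Int) (words : List String) :
    solution_alt counts words =
      ((PySem.List.dedup (words.map pvLow)).map (fun v =>
        if 2 ≤ (runB (words.map pvLow)).2.getD (bKey v) 0 then ((words.map pvLow).count v : Int) else 0)).sum := by
  have hfoldB : ∀ (ws : List String) init,
      ws.foldl (fun (st : PySem.Dict String Int × PySem.Dict String Int) word =>
        let w := PySem.Str.lower word
        let occ := st.1
        let freq := st.2
        if occ.contains w then (occ.insert w (occ.getD w 0 + 1), freq)
        else
          let key := bKey w
          (occ.insert w 1, freq.insert key (freq.getD key 0 + 1))) init =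
      (ws.map pvLow).foldl stepB init := by
    intro ws
    induction ws with
    | nil => intro init; rfl
    | cons x t ih =>
      intro init
      simp only [List.foldl_cons, List.map_cons]
      rw [ih]
      rfl
  have hsum : ∀ (freq : PySem.Dict String Int) (l : List (String × Int)) (a : Int),
      l.foldl (fun acc p => if 2 ≤ freq.getD (bKey p.1) 0 then acc + p.2 else acc) a =
      a + (l.map (fun p => if 2 ≤ freq.getD (bKey p.1) 0 then p.2 else 0)).sum := by
    intro freq l
    induction l with
    | nil => intro a; simp
    | cons x t ih =>
      intro a
      simp only [List.foldl_cons, List.map_cons, List.sum_cons]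
      rw [ih]
      by_cases h : 2 ≤ freq.getD (bKey x.1) 0
      · rw [if_pos h, if_pos h]; ring
      · rw [if_neg h, if_neg h]; ring
  unfold solution_alt
  rw [hfoldB, hsum]
  rw [show (words.map pvLow).foldl stepB (PySem.Dict.empty, PySem.Dict.empty) = runB (words.map pvLow) from rfl]
  rw [(invB (words.map pvLow)).1, List.map_map, zero_add]
  apply congrArg
  apply List.map_congr_left
  intro v _
  rfl

-- ===== VERDICT (by name: the statement is the Claim_ definition above) =====
theorem solution_spec : Claim_equal_solution := by
  unfold Claim_equal_solution
  intro counts words _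
  unfold Spec_solution
  rw [solution_eq_countP, solution_alt_eq_sum]
  obtain ⟨hA1, hA2, hA3⟩ := invA (words.map pvLow)
  obtain ⟨hB1, hB2⟩ := invB (words.map pvLow)
  rw [List.countP_congr (q := fun w => decide (2 ≤ (PySem.List.dedup (words.map pvLow)).countP
      (fun v => PySem.Set.equal (pvSet v) (pvSet w))))
    (fun w _ => by rw [hA3 (pvSet w)]; simp)]
  rw [countP_eq_sum_dedup]
  apply congrArg
  apply List.map_congr_left
  intro v hv
  have hgetD := hB2 (bKey v)
  have hcnt : (PySem.List.dedup (words.map pvLow)).countP (fun u => bKey u == bKey v) =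
      (PySem.List.dedup (words.map pvLow)).countP (fun u => PySem.Set.equal (pvSet u) (pvSet v)) := by
    apply List.countP_congr
    intro u _
    constructor
    · intro h
      have : bKey u = bKey v := by simpa using h
      exact (bKey_eq_iff u v).mp this
    · intro h
      have : bKey u = bKey v := (bKey_eq_iff u v).mpr h
      simpa using this
  rw [hgetD, hcnt]
  by_cases h : 2 ≤ (PySem.List.dedup (words.map pvLow)).countP
      (fun u => PySem.Set.equal (pvSet u) (pvSet v))
  · rw [if_pos (by simpa using h), if_pos (by exact_mod_cast h)]
  · rw [if_neg (by simpa using h), if_neg (by exact_mod_cast h)]
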